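-- pv_equiv track=rewrite | github.com/tinatavakolifar/graph_analyser | Graph Analyser.py | get_node_degree
-- ===== SOURCE A (Python) =====
-- def get_node_degree(node_num, edge_list, is_directed): #درجه گره‌ و گره‌ ایزوله
--     degree_list = []                                   #  و امکان تشکیل حلقه
--     makes_cycle = True
--
--     connected_nodes = set()
--     for edge in edge_list:
--         connected_nodes.add(edge[0])
--         connected_nodes.add(edge[1])
--
--     for node in range(1, node_num + 1):
--         if is_directed:
--             degree_in = degree_out = 0
--             for u, v, *_ in edge_list:
--                 if u == node:
--                     degree_out += 1
--                 if v == node: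
--                     degree_in += 1
--             degree_list.append(
--                 (node, degree_in, degree_out, degree_in + degree_out)
--             )
--             if degree_in != 1 or degree_out != 1:
--                 makes_cycle = False
--         else:
--             degree = sum(
--                 1 for u, v, *_ in edge_list if u == node or v == node
--             )
--             degree_list.append((node, degree))
--             if degree != 2:
--                 makes_cycle = False
--
--     isolated_list = [
--         n for n in range(1, node_num + 1) if n not in connected_nodes
--     ]
--     isolated_num = len(isolated_list)
--     return makes_cycle, isolated_num, degree_list, isolated_list
-- ===== SOURCE B (Python) =====
-- def get_node_degree(node_num, edge_list, is_directed):
--     # One pass over the edges builds degree dictionaries; every per-node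
--     # answer is then an O(1) lookup instead of a scan of the edge list.
--     heads = [e[0] for e in edge_list]
--     tails = [e[1] for e in edge_list]
--
--     if is_directed:
--         dout = {}
--         for u in heads:
--             dout[u] = dout.get(u, 0) + 1
--         din = {}
--         for v in tails:
--             din[v] = din.get(v, 0) + 1
--         degree_list = [
--             (n, din.get(n, 0), dout.get(n, 0), din.get(n, 0) + dout.get(n, 0))
--             for n in range(1, node_num + 1)
--         ]
--         makes_cycle = all(
--             din.get(n, 0) == 1 and dout.get(n, 0) == 1
--             for n in range(1, node_num + 1)
--         )
--     else:
--         deg = {}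
--         for u, v in zip(heads, tails):
--             deg[u] = deg.get(u, 0) + 1
--             if v != u:
--                 deg[v] = deg.get(v, 0) + 1
--         degree_list = [(n, deg.get(n, 0)) for n in range(1, node_num + 1)]
--         makes_cycle = all(
--             deg.get(n, 0) == 2 for n in range(1, node_num + 1)
--         )
--
--     connected_nodes = set(heads) | set(tails)
--     isolated_list = [
--         n for n in range(1, node_num + 1) if n not in connected_nodes
--     ]
--     return makes_cycle, len(isolated_list), degree_list, isolated_list
-- ===== Notes on version B (the rewrite author's own statement) =====
-- stated objective: faster
-- what changed: B makes one pass over the edge list accumulating in/out/undirected degree counts into dictionaries, then answers every per-node query by an O(1) lookup, instead of A's rescan of the whole edge list for each node.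
import Mathlib
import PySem

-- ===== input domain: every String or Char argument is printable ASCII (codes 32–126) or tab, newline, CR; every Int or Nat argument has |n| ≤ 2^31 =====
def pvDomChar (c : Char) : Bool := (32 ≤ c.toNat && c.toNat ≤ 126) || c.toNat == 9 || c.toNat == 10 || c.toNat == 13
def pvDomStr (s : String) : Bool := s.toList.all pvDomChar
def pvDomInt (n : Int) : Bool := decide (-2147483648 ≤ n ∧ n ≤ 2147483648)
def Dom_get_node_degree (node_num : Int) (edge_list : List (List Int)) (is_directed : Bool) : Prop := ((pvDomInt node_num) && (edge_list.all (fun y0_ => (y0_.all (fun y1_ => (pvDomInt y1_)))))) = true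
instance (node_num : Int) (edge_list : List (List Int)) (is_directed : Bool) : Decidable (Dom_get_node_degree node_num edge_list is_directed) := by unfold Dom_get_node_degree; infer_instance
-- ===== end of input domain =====

-- B replaces A's per-node rescans of the edge list by one pass building degree
-- dictionaries and per-node O(1) lookups (objective: faster, asymptotic).


-- ===== PORT A =====
def get_node_degree (node_num : Int) (edge_list : List (List Int)) (is_directed : Bool) : Bool × Int × List (List Int) × List Int :=
  let connected_nodes : PySem.Set Int :=
    edge_list.foldl (fun s e =>
      PySem.Set.add (PySem.Set.add s (PySem.List.pyGetD e 0 0)) (PySem.List.pyGetD e 1 0))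
      PySem.Set.empty
  -- the single node loop updating (degree_list, makes_cycle); p = (degree_in, degree_out)
  let r := (PySem.List.pyRange 1 (node_num + 1) 1).foldl (fun acc node =>
    if is_directed then
      let p := edge_list.foldl (fun (p : Int × Int) e =>
        (if PySem.List.pyGetD e 1 0 == node then p.1 + 1 else p.1,
         if PySem.List.pyGetD e 0 0 == node then p.2 + 1 else p.2)) (0, 0)
      (acc.1 ++ [[node, p.1, p.2, p.1 + p.2]],
       if p.1 != 1 || p.2 != 1 then false else acc.2)
    else
      let degree := edge_list.foldl (fun (s : Int) e =>
        if PySem.List.pyGetD e 0 0 == node || PySem.List.pyGetD e 1 0 == node then s + 1 else s) 0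
      (acc.1 ++ [[node, degree]], if degree != 2 then false else acc.2))
    (([] : List (List Int)), true)
  let isolated_list := (PySem.List.pyRange 1 (node_num + 1) 1).filter
    (fun n => !(PySem.Set.contains connected_nodes n))
  (r.2, (isolated_list.length : Int), r.1, isolated_list)

-- ===== PORT B =====
def get_node_degree_alt (node_num : Int) (edge_list : List (List Int)) (is_directed : Bool) : Bool × Int × List (List Int) × List Int :=
  let heads := edge_list.map (fun e => PySem.List.pyGetD e 0 0)
  let tails := edge_list.map (fun e => PySem.List.pyGetD e 1 0)
  let nodes := PySem.List.pyRange 1 (node_num + 1) 1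
  let dm :=
    if is_directed then
      let dout := heads.foldl (fun d u => d.insert u (d.getD u 0 + 1)) PySem.Dict.empty
      let din := tails.foldl (fun d v => d.insert v (d.getD v 0 + 1)) PySem.Dict.empty
      (nodes.map (fun n => [n, din.getD n 0, dout.getD n 0, din.getD n 0 + dout.getD n 0]),
       nodes.all (fun n => din.getD n 0 == 1 && dout.getD n 0 == 1))
    else
      let deg := (heads.zip tails).foldl (fun d uv =>
        let d' := d.insert uv.1 (d.getD uv.1 0 + 1)
        if uv.2 != uv.1 then d'.insert uv.2 (d'.getD uv.2 0 + 1) else d') PySem.Dict.empty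
      (nodes.map (fun n => [n, deg.getD n 0]), nodes.all (fun n => deg.getD n 0 == 2))
  let connected_nodes := PySem.Set.union (PySem.Set.ofList heads) (PySem.Set.ofList tails)
  let isolated_list := nodes.filter (fun n => !(PySem.Set.contains connected_nodes n))
  (dm.2, (isolated_list.length : Int), dm.1, isolated_list)

-- ===== PRECONDITION & SPEC =====
-- Pre_ excludes exactly the inputs where Python A raises (IndexError/ValueError on an edge with fewer than two endpoints).
def Pre_get_node_degree (node_num : Int) (edge_list : List (List Int)) (is_directed : Bool) : Prop :=
  ∀ e ∈ edge_list, 2 ≤ e.length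
instance (node_num : Int) (edge_list : List (List Int)) (is_directed : Bool) : Decidable (Pre_get_node_degree node_num edge_list is_directed) := by unfold Pre_get_node_degree; infer_instance
def pvWitness_get_node_degree : Int × List (List Int) × Bool := (2, [[1, 2], [2, 1]], true)

def Spec_get_node_degree (node_num : Int) (edge_list : List (List Int)) (is_directed : Bool) (out : Bool × Int × List (List Int) × List Int) : Prop := out = get_node_degree_alt node_num edge_list is_directed
instance (node_num : Int) (edge_list : List (List Int)) (is_directed : Bool) (out : Bool × Int × List (List Int) × List Int) : Decidable (Spec_get_node_degree node_num edge_list is_directed out) := by unfold Spec_get_node_degree; infer_instance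

-- ===== CLAIM (what is proved, stated in full; the proofs are below) =====
def Claim_equal_get_node_degree : Prop := ∀ (node_num : Int) (edge_list : List (List Int)) (is_directed : Bool), Dom_get_node_degree node_num edge_list is_directed → Pre_get_node_degree node_num edge_list is_directed → Spec_get_node_degree node_num edge_list is_directed (get_node_degree node_num edge_list is_directed)

-- ===== LEMMAS AND PROOFS =====

-- A's node loop: appending one row and clearing the flag is a map plus an 'all'
theorem pv_foldl_out (nodes : List Int) (f : Int → List Int) (q : Int → Bool)
    (l : List (List Int)) (b : Bool) :
    nodes.foldl (fun acc n => (acc.1 ++ [f n], if q n then false else acc.2)) (l, b)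
    = (l ++ nodes.map f, b && nodes.all (fun n => !q n)) := by
  induction nodes generalizing l b with
  | nil => simp
  | cons x xs ih =>
    simp only [List.foldl_cons, ih, List.map_cons, List.all_cons, Prod.mk.injEq]
    constructor
    · simp
    · cases q x <;> cases b <;> simp

-- A's directed inner scan counts occurrences among the tails and the heads
theorem pv_inner_dir (el : List (List Int)) (node a b : Int) :
    el.foldl (fun (p : Int × Int) e =>
      (if PySem.List.pyGetD e 1 0 == node then p.1 + 1 else p.1,
       if PySem.List.pyGetD e 0 0 == node then p.2 + 1 else p.2)) (a, b)
    = (a + ((el.map (fun e => PySem.List.pyGetD e 1 0)).count node : Int),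
       b + ((el.map (fun e => PySem.List.pyGetD e 0 0)).count node : Int)) := by
  induction el generalizing a b with
  | nil => simp
  | cons e es ih =>
    simp only [List.foldl_cons, ih, List.map_cons, List.count_cons, Prod.mk.injEq]
    constructor <;> (split_ifs with h <;> push_cast <;> omega)

-- B's undirected dictionary pass counts the incident pairs
theorem pv_deg_getD (pairs : List (Int × Int)) (d : PySem.Dict Int Int) (x : Int) :
    (pairs.foldl (fun d uv =>
      let d' := d.insert uv.1 (d.getD uv.1 0 + 1)
      if uv.2 != uv.1 then d'.insert uv.2 (d'.getD uv.2 0 + 1) else d') d).getD x 0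
    = d.getD x 0 + (pairs.countP (fun uv => uv.1 == x || uv.2 == x) : Int) := by
  induction pairs generalizing d with
  | nil => simp
  | cons uv ps ih =>
    simp only [List.foldl_cons, ih, List.countP_cons]
    clear ih
    have hstep : ((fun (d : PySem.Dict Int Int) (uv : Int × Int) =>
        let d' := d.insert uv.1 (d.getD uv.1 0 + 1)
        if uv.2 != uv.1 then d'.insert uv.2 (d'.getD uv.2 0 + 1) else d') d uv).getD x 0
        = d.getD x 0 + (if uv.1 == x || uv.2 == x then 1 else 0) := by
      simp only [bne_iff_ne, ne_eq, PySem.Dict.getD_insert, beq_iff_eq, Bool.or_eq_true]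
      split_ifs <;> (try simp_all [PySem.Dict.getD_insert]) <;> (try split_ifs) <;> subst_vars <;> omega
    rw [hstep]
    split_ifs <;> push_cast <;> omega

-- membership in A's interleaved connected-set build
theorem pv_mem_conn (el : List (List Int)) (s : PySem.Set Int) (n : Int) :
    n ∈ el.foldl (fun s e =>
      PySem.Set.add (PySem.Set.add s (PySem.List.pyGetD e 0 0)) (PySem.List.pyGetD e 1 0)) s
    ↔ n ∈ s ∨ n ∈ el.map (fun e => PySem.List.pyGetD e 0 0)
            ∨ n ∈ el.map (fun e => PySem.List.pyGetD e 1 0) := by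
  induction el generalizing s with
  | nil => simp
  | cons e es ih => simp [ih, PySem.Set.mem_add]; aesop

theorem get_node_degree_spec_aux (node_num : Int) (edge_list : List (List Int)) (is_directed : Bool) :
    get_node_degree node_num edge_list is_directed = get_node_degree_alt node_num edge_list is_directed := by
  have hiso : ∀ n : Int,
      (!(PySem.Set.contains (edge_list.foldl (fun s e =>
          PySem.Set.add (PySem.Set.add s (PySem.List.pyGetD e 0 0)) (PySem.List.pyGetD e 1 0))
          PySem.Set.empty) n))
      = (!(PySem.Set.contains (PySem.Set.union
          (PySem.Set.ofList (edge_list.map (fun e => PySem.List.pyGetD e 0 0)))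
          (PySem.Set.ofList (edge_list.map (fun e => PySem.List.pyGetD e 1 0)))) n)) := by
    intro n
    have h1 := pv_mem_conn edge_list PySem.Set.empty n
    cases ha : PySem.Set.contains (edge_list.foldl (fun s e =>
        PySem.Set.add (PySem.Set.add s (PySem.List.pyGetD e 0 0)) (PySem.List.pyGetD e 1 0))
        PySem.Set.empty) n <;>
      cases hb : PySem.Set.contains (PySem.Set.union
        (PySem.Set.ofList (edge_list.map (fun e => PySem.List.pyGetD e 0 0)))
        (PySem.Set.ofList (edge_list.map (fun e => PySem.List.pyGetD e 1 0)))) n <;>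
      simp_all [PySem.Set.mem_union, PySem.Set.mem_ofList,
        PySem.Set.empty] <;> tauto
  cases is_directed with
  | true =>
    simp only [get_node_degree, get_node_degree_alt, if_true]
    simp only [pv_inner_dir, pv_foldl_out, hiso, PySem.Dict.getD_foldl_insert_add_one,
      PySem.Dict.getD_empty, zero_add, List.nil_append]
    simp [Bool.not_or, bne, Bool.not_not]
  | false =>
    simp only [get_node_degree, get_node_degree_alt, Bool.false_eq_true, if_false]
    have hzip : (edge_list.map (fun e => PySem.List.pyGetD e 0 0)).zip
        (edge_list.map (fun e => PySem.List.pyGetD e 1 0))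
        = edge_list.map (fun e => (PySem.List.pyGetD e 0 0, PySem.List.pyGetD e 1 0)) := by
      rw [List.zip_map']
    simp only [PySem.List.foldl_if_add_one, pv_foldl_out, hiso, hzip, pv_deg_getD,
      PySem.Dict.getD_empty, zero_add, List.countP_map, List.nil_append]
    simp [Bool.not_or, bne, Bool.not_not, Function.comp_def]

-- ===== VERDICT (by name: the statement is the Claim_ definition above) =====
theorem get_node_degree_spec : Claim_equal_get_node_degree := by
  intro node_num edge_list is_directed _ _
  exact get_node_degree_spec_aux node_num edge_list is_directed
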